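-- pv_equiv track=rewrite | github.com/Algod001/gengi | seo_opti/temp.py | process_video_audio_extensions
-- ===== SOURCE A (Python) =====
-- def process_video_audio_extensions(line):
--     """
--     Takes a string and checks if it contains a video or audio extension.
--     If so, adds the extension to a video or audio tag and returns the updated string.
--     Otherwise, returns the original string.
--     """
--     video_audio_extensions = [".mp4", ".avi", ".mov", ".mp3", ".wav", ".ogg"]
--     for extension in video_audio_extensions:
--         if extension in line:
--             if extension in [".mp4", ".avi", ".mov"]:
--                 line = f'<video src="{line}" controls></video>'
--             else:
--                 line = f'<audio src="{line}" controls></audio>'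
--             break
--     return line
-- ===== SOURCE B (Python) =====
-- def process_video_audio_extensions(line):
--     # Single left-to-right scan over dot positions: classify the 3 characters
--     # after each '.' and record whether a video / audio extension occurs.
--     has_video = False
--     has_audio = False
--     for i in range(len(line) - 3):
--         if line[i] == ".":
--             seg = line[i + 1:i + 4]
--             if seg in ("mp4", "avi", "mov"):
--                 has_video = True
--             elif seg in ("mp3", "wav", "ogg"):
--                 has_audio = True
--     if has_video:
--         return f'<video src="{line}" controls></video>'
--     if has_audio:
--         return f'<audio src="{line}" controls></audio>'
--     return line
-- ===== Notes on version B (the rewrite author's own statement) =====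
-- stated objective: alternative
-- what changed: Replaces A's loop over a six-extension list with six separate substring searches (and break) by one left-to-right scan over the string's character positions: at each dot character the next three characters are classified into the video or audio group via two flag accumulators, and the tag is chosen from the flags afterwards.
import Mathlib
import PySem

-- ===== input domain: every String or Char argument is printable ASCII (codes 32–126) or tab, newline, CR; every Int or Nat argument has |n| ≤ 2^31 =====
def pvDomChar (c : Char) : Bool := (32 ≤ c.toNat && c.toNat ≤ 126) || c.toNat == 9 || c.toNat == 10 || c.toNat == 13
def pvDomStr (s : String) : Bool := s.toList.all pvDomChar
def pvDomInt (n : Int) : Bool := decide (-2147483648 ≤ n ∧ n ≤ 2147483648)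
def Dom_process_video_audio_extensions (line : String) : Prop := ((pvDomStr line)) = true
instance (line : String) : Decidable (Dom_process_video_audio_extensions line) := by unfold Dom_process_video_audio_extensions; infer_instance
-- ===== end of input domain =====

-- B replaces A's six substring searches (loop over an extension list with break) by one
-- left-to-right scan over character positions that classifies the 3 characters after each
-- '.' and keeps two flags (objective: alternative).
-- ===== PORT A =====
def pvA_tag (line : String) (extension : String) : String :=
  if ([".mp4", ".avi", ".mov"].contains extension) then
    "<video src=\"" ++ line ++ "\" controls></video>"
  else
    "<audio src=\"" ++ line ++ "\" controls></audio>"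

-- the for-loop with break: first matching extension rewrites line and stops
def pvA_loop (line : String) : List String → String
  | [] => line
  | extension :: rest =>
      if PySem.Str.isIn extension line then pvA_tag line extension
      else pvA_loop line rest

def process_video_audio_extensions (line : String) : String :=
  pvA_loop line [".mp4", ".avi", ".mov", ".mp3", ".wav", ".ogg"]

-- ===== PORT B =====
-- body of Source B's for-loop: one step over index i, updating the (has_video, has_audio) flags.
-- line[i+1:i+4] = (s.drop (i+1)).take 3 (exact: PySem.List.slice_natCast_add with natural bounds)
def pvB_step (s : List Char) (st : Bool × Bool) (i : Nat) : Bool × Bool :=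
  if s[i]? = some '.' then
    let seg := (s.drop (i + 1)).take 3
    if seg = ['m','p','4'] ∨ seg = ['a','v','i'] ∨ seg = ['m','o','v'] then
      (true, st.2)
    else if seg = ['m','p','3'] ∨ seg = ['w','a','v'] ∨ seg = ['o','g','g'] then
      (st.1, true)
    else st
  else st

def process_video_audio_extensions_alt (line : String) : String :=
  let s := line.toList
  -- range(len(line) - 3): Nat subtraction clamps at 0 exactly as Python's empty range
  let flags := (List.range (s.length - 3)).foldl (pvB_step s) (false, false)
  if flags.1 then "<video src=\"" ++ line ++ "\" controls></video>"
  else if flags.2 then "<audio src=\"" ++ line ++ "\" controls></audio>"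
  else line

-- ===== PRECONDITION & SPEC =====
def Spec_process_video_audio_extensions (line : String) (out : String) : Prop := out = process_video_audio_extensions_alt line
instance (line : String) (out : String) : Decidable (Spec_process_video_audio_extensions line out) := by unfold Spec_process_video_audio_extensions; infer_instance

-- ===== CLAIM (what is proved, stated in full; the proofs are below) =====
def Claim_equal_process_video_audio_extensions : Prop := ∀ (line : String), Dom_process_video_audio_extensions line → Spec_process_video_audio_extensions line (process_video_audio_extensions line)

-- ===== LEMMAS AND PROOFS =====

-- the pointwise tests the scanner's flags accumulate
def pvVB (s : List Char) (i : Nat) : Bool :=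
  (s[i]? = some '.') &&
    (let seg := (s.drop (i + 1)).take 3
     seg = ['m','p','4'] ∨ seg = ['a','v','i'] ∨ seg = ['m','o','v'])

def pvAB (s : List Char) (i : Nat) : Bool :=
  (s[i]? = some '.') &&
    (let seg := (s.drop (i + 1)).take 3
     seg = ['m','p','3'] ∨ seg = ['w','a','v'] ∨ seg = ['o','g','g'])

lemma pvB_step_eq (s : List Char) (st : Bool × Bool) (i : Nat) :
    pvB_step s st i = (st.1 || pvVB s i, st.2 || pvAB s i) := by
  unfold pvB_step pvVB pvAB
  by_cases hd : s[i]? = some '.'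
  · simp only [hd]
    by_cases hc1 : (s.drop (i + 1)).take 3 = ['m','p','4'] ∨ (s.drop (i + 1)).take 3 = ['a','v','i'] ∨
        (s.drop (i + 1)).take 3 = ['m','o','v']
    · by_cases hc2 : (s.drop (i + 1)).take 3 = ['m','p','3'] ∨ (s.drop (i + 1)).take 3 = ['w','a','v'] ∨
          (s.drop (i + 1)).take 3 = ['o','g','g']
      · exfalso
        rcases hc1 with h | h | h <;> rcases hc2 with h' | h' | h' <;> rw [h] at h' <;> simp at h'
      · simp [hc1, hc2]
    · by_cases hc2 : (s.drop (i + 1)).take 3 = ['m','p','3'] ∨ (s.drop (i + 1)).take 3 = ['w','a','v'] ∨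
          (s.drop (i + 1)).take 3 = ['o','g','g'] <;> simp [hc1, hc2]
  · simp [hd]

lemma pv_foldl_flags (s : List Char) (l : List Nat) (v a : Bool) :
    l.foldl (pvB_step s) (v, a) = (v || l.any (pvVB s), a || l.any (pvAB s)) := by
  induction l generalizing v a with
  | nil => simp
  | cons x xs ih =>
      simp [List.foldl_cons, pvB_step_eq, ih, List.any_cons, Bool.or_assoc]

-- a 4-character pattern c::t matches at i  ↔  c::t is a prefix of s.drop i
lemma pv_matchAt_iff (s : List Char) (c : Char) (t : List Char) (ht : t.length = 3) (i : Nat) :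
    (s[i]? = some c ∧ (s.drop (i + 1)).take 3 = t) ↔ (c :: t) <+: s.drop i := by
  constructor
  · rintro ⟨hget, htake⟩
    have hi : i < s.length := by
      by_contra h
      push Not at h
      rw [List.getElem?_eq_none h] at hget
      simp at hget
    have hdrop : s.drop i = s[i] :: s.drop (i + 1) := List.drop_eq_getElem_cons hi
    rw [hdrop]
    have hc : s[i] = c := by simpa [List.getElem?_eq_getElem hi] using hget
    rw [hc]
    exact List.cons_prefix_cons.mpr ⟨rfl, htake ▸ List.take_prefix 3 _⟩
  · intro hpre
    have hi : i < s.length := by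
      by_contra h
      rw [List.drop_eq_nil_of_le (by omega)] at hpre
      simpa using hpre.length_le
    have hdrop : s.drop i = s[i] :: s.drop (i + 1) := List.drop_eq_getElem_cons hi
    rw [hdrop] at hpre
    obtain ⟨hc, hpre'⟩ := List.cons_prefix_cons.mp hpre
    refine ⟨by simp [List.getElem?_eq_getElem hi, hc], ?_⟩
    have := List.prefix_iff_eq_take.mp hpre'
    rw [ht] at this
    exact this.symm

-- a match position is automatically < length - 3
lemma pv_matchAt_lt (s : List Char) (c : Char) (t : List Char) (ht : t.length = 3) (i : Nat)
    (h : (c :: t) <+: s.drop i) : i < s.length - 3 := by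
  have h4 := h.length_le
  simp only [List.length_cons, ht, List.length_drop] at h4
  omega

-- '.mp4' in line  etc., as an existential over scan positions
lemma pv_isIn_iff (s : List Char) (c : Char) (t : List Char) (ht : t.length = 3) :
    PySem.Chars.isIn (c :: t) s = true ↔
      ∃ i, i < s.length - 3 ∧ s[i]? = some c ∧ (s.drop (i + 1)).take 3 = t := by
  rw [← PySem.Chars.exists_prefix_drop_iff_isIn]
  constructor
  · rintro ⟨j, hj⟩
    exact ⟨j, pv_matchAt_lt s c t ht j hj, (pv_matchAt_iff s c t ht j).mpr hj⟩
  · rintro ⟨i, _, h2, h3⟩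
    exact ⟨i, (pv_matchAt_iff s c t ht i).mp ⟨h2, h3⟩⟩

lemma pv_existsV (line : String) :
    (∃ i < line.length - 3, pvVB line.toList i = true) ↔
      (PySem.Chars.isIn ['.','m','p','4'] line.toList = true ∨ PySem.Chars.isIn ['.','a','v','i'] line.toList = true ∨
       PySem.Chars.isIn ['.','m','o','v'] line.toList = true) := by
  have hl : line.length = line.toList.length := String.length_toList.symm
  rw [hl, pv_isIn_iff line.toList '.' ['m','p','4'] rfl, pv_isIn_iff line.toList '.' ['a','v','i'] rfl,
      pv_isIn_iff line.toList '.' ['m','o','v'] rfl]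
  simp only [pvVB, Bool.and_eq_true, decide_eq_true_eq]
  constructor
  · rintro ⟨i, hi, hd, h | h | h⟩
    · exact Or.inl ⟨i, hi, hd, h⟩
    · exact Or.inr (Or.inl ⟨i, hi, hd, h⟩)
    · exact Or.inr (Or.inr ⟨i, hi, hd, h⟩)
  · rintro (⟨i, hi, hd, h⟩ | ⟨i, hi, hd, h⟩ | ⟨i, hi, hd, h⟩) <;>
      exact ⟨i, hi, hd, by simp [h]⟩

lemma pv_existsA (line : String) :
    (∃ i < line.length - 3, pvAB line.toList i = true) ↔
      (PySem.Chars.isIn ['.','m','p','3'] line.toList = true ∨ PySem.Chars.isIn ['.','w','a','v'] line.toList = true ∨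
       PySem.Chars.isIn ['.','o','g','g'] line.toList = true) := by
  have hl : line.length = line.toList.length := String.length_toList.symm
  rw [hl, pv_isIn_iff line.toList '.' ['m','p','3'] rfl, pv_isIn_iff line.toList '.' ['w','a','v'] rfl,
      pv_isIn_iff line.toList '.' ['o','g','g'] rfl]
  simp only [pvAB, Bool.and_eq_true, decide_eq_true_eq]
  constructor
  · rintro ⟨i, hi, hd, h | h | h⟩
    · exact Or.inl ⟨i, hi, hd, h⟩
    · exact Or.inr (Or.inl ⟨i, hi, hd, h⟩)
    · exact Or.inr (Or.inr ⟨i, hi, hd, h⟩)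
  · rintro (⟨i, hi, hd, h⟩ | ⟨i, hi, hd, h⟩ | ⟨i, hi, hd, h⟩) <;>
      exact ⟨i, hi, hd, by simp [h]⟩

-- ===== VERDICT (by name: the statement is the Claim_ definition above) =====
theorem process_video_audio_extensions_spec : Claim_equal_process_video_audio_extensions := by
  intro line _
  unfold Spec_process_video_audio_extensions process_video_audio_extensions
    process_video_audio_extensions_alt
  simp only [pv_foldl_flags, Bool.false_or]
  by_cases h1 : PySem.Chars.isIn ['.', 'm', 'p', '4'] line.toList = true <;>
  by_cases h2 : PySem.Chars.isIn ['.', 'a', 'v', 'i'] line.toList = true <;>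
  by_cases h3 : PySem.Chars.isIn ['.', 'm', 'o', 'v'] line.toList = true <;>
  by_cases h4 : PySem.Chars.isIn ['.', 'm', 'p', '3'] line.toList = true <;>
  by_cases h5 : PySem.Chars.isIn ['.', 'w', 'a', 'v'] line.toList = true <;>
  by_cases h6 : PySem.Chars.isIn ['.', 'o', 'g', 'g'] line.toList = true <;>
    simp [pvA_loop, pvA_tag, h1, h2, h3, h4, h5, h6, pv_existsV, pv_existsA]
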